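-- pv_equiv track=rewrite | github.com/Louis-udm/Leetcode | Extra/max_exponential_series.py | max_set_size
-- ===== SOURCE A (Python) =====
-- def max_set_size(rice_bags):
--     rice_bags = sorted(rice_bags)
--     bag_map = {r: r for r in rice_bags}
--     max_count = count = 1
--     taked_map = {}
--     for r in rice_bags:
--         if r not in taked_map:
--             cur = r * r
--             while cur in bag_map:
--                 taked_map[cur] = cur
--                 count += 1
--                 cur *= cur
--             max_count = max(max_count, count)
--             count = 1
--
--     return max_count if max_count > 1 else -1
-- ===== SOURCE B (Python) =====
-- def max_set_size(rice_bags):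
--     # DP over the distinct values in descending order: each value's chain
--     # length is 1 + the already-computed length of its square.
--     memo = {}
--     best = 1
--     for x in sorted(set(rice_bags), reverse=True):
--         sq = x * x
--         memo[x] = 1 + memo[sq] if sq in memo else 1
--         best = max(best, memo[x])
--     return best if best > 1 else -1
-- ===== Notes on version B (the rewrite author's own statement) =====
-- stated objective: alternative
-- what changed: Replaces A's sorted full scan with per-element repeated-squaring walks and a 'taked' skip-set by a single descending-order DP pass over the distinct values, where each value's chain length is 1 + the memoized length of its square; also terminates (returning) on inputs containing 0 or 1, where A loops forever (excluded by Pre_).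
import Mathlib
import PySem

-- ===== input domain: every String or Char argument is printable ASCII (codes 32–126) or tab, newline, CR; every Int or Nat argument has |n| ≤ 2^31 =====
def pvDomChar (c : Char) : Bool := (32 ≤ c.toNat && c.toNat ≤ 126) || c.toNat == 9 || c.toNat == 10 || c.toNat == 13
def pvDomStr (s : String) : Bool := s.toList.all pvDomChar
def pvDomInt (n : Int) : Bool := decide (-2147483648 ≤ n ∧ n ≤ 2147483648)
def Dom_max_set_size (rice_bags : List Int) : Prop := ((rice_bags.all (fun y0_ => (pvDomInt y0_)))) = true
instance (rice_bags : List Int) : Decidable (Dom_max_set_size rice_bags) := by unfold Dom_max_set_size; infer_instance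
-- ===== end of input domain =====

-- B replaces A's per-element square-walks with a 'taked' skip-set by one descending DP pass
-- over the distinct values (alternative decomposition, similar cost).

-- ===== PORT A =====
-- the inner 'while cur in bag_map' loop; fuel makes it total in Lean (on Pre_ inputs the
-- chain is strictly increasing inside the set, so fuel = len(rice_bags) is never exhausted)
def aInner (bag : PySem.Dict Int Int) : Nat → PySem.Dict Int Int → Int → Int → PySem.Dict Int Int × Int
  | 0, taked, _, count => (taked, count)
  | f + 1, taked, cur, count =>
    if bag.contains cur then
      aInner bag f (taked.insert cur cur) (cur * cur) (count + 1)
    else (taked, count)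

-- one iteration of A's 'for r in rice_bags' loop; state = (taked_map, max_count, count)
def astep (bag : PySem.Dict Int Int) (fuel : Nat)
    (st : PySem.Dict Int Int × Int × Int) (r : Int) : PySem.Dict Int Int × Int × Int :=
  if st.1.contains r then st
  else
    let p := aInner bag fuel st.1 (r * r) st.2.2
    (p.1, max st.2.1 p.2, 1)

def max_set_size (rice_bags : List Int) : Int :=
  let sortedBags := PySem.List.sorted rice_bags (fun x => x) false
  let bag_map := sortedBags.foldl (fun d r => d.insert r r) PySem.Dict.empty
  let st := sortedBags.foldl (astep bag_map rice_bags.length) (PySem.Dict.empty, 1, 1)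
  if st.2.1 > 1 then st.2.1 else -1

-- ===== PORT B =====
-- one iteration of B's loop; state = (memo, best)
def bstep (st : PySem.Dict Int Int × Int) (x : Int) : PySem.Dict Int Int × Int :=
  let sq := x * x
  let memo := st.1.insert x (if st.1.contains sq then 1 + st.1.getD sq 0 else 1)
  (memo, max st.2 (memo.getD x 0))

def max_set_size_alt (rice_bags : List Int) : Int :=
  let st := (PySem.List.sorted (PySem.Set.ofList rice_bags) (fun x => x) true).foldl bstep
    (PySem.Dict.empty, 1)
  if st.2 > 1 then st.2 else -1

-- ===== PRECONDITION & SPEC =====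
-- Pre_ excludes inputs containing 0 or 1: there A's inner 'while' loop sticks at the
-- fixed point of squaring and the Python never returns (infinite loop).
def Pre_max_set_size (rice_bags : List Int) : Prop :=
  (0 : Int) ∉ rice_bags ∧ (1 : Int) ∉ rice_bags
instance (rice_bags : List Int) : Decidable (Pre_max_set_size rice_bags) := by
  unfold Pre_max_set_size; infer_instance
def pvWitness_max_set_size : List Int := [3, 2, 16, 4, -2]

def Spec_max_set_size (rice_bags : List Int) (out : Int) : Prop := out = max_set_size_alt rice_bags
instance (rice_bags : List Int) (out : Int) : Decidable (Spec_max_set_size rice_bags out) := by unfold Spec_max_set_size; infer_instance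

-- ===== CLAIM (what is proved, stated in full; the proofs are below) =====
def Claim_equal_max_set_size : Prop := ∀ (rice_bags : List Int), Dom_max_set_size rice_bags → Pre_max_set_size rice_bags → Spec_max_set_size rice_bags (max_set_size rice_bags)

-- ===== LEMMAS AND PROOFS =====

-- x² is strictly above x for every integer other than the fixed points 0 and 1
lemma lt_sq (x : Int) (h0 : x ≠ 0) (h1 : x ≠ 1) : x < x * x := by
  rcases lt_trichotomy x 0 with h | h | h
  · nlinarith
  · exact absurd h h0
  · nlinarith [show 2 ≤ x by omega]

-- master invariant for B's fold: memo keys grow by exactly the processed prefix, values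
-- satisfy the chain recurrence, are between 1 and the memo size, and best is the running max
set_option maxHeartbeats 1000000 in
lemma bfold (bags : List Int) (hpre : (0 : Int) ∉ bags ∧ (1 : Int) ∉ bags) :
    ∀ (L : List Int) (m : PySem.Dict Int Int) (b : Int),
    (∀ y ∈ L, y ∈ bags) →
    L.Pairwise (fun a b => b < a) →
    m.keys.Nodup →
    (∀ k, m.contains k = true ↔ (k ∈ bags ∧ k ∉ L)) →
    (∀ y ∈ L, ∀ k, m.contains k = true → y < k) →
    (∀ k, m.contains k = true →
        m.getD k 0 = if k * k ∈ bags then 1 + m.getD (k * k) 0 else 1) →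
    (∀ k, m.contains k = true → 1 ≤ m.getD k 0 ∧ m.getD k 0 ≤ m.size) →
    (1 ≤ b ∧ (b = 1 ∨ ∃ k, m.contains k = true ∧ b = m.getD k 0) ∧
      (∀ k, m.contains k = true → m.getD k 0 ≤ b)) →
    (∀ k, (L.foldl bstep (m, b)).1.contains k = true ↔ (m.contains k = true ∨ k ∈ L)) ∧
    (∀ k, m.contains k = true → (L.foldl bstep (m, b)).1.getD k 0 = m.getD k 0) ∧
    (∀ k, (L.foldl bstep (m, b)).1.contains k = true →
        (L.foldl bstep (m, b)).1.getD k 0 =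
          if k * k ∈ bags then 1 + (L.foldl bstep (m, b)).1.getD (k * k) 0 else 1) ∧
    (∀ k, (L.foldl bstep (m, b)).1.contains k = true →
        1 ≤ (L.foldl bstep (m, b)).1.getD k 0 ∧
        (L.foldl bstep (m, b)).1.getD k 0 ≤ (L.foldl bstep (m, b)).1.size) ∧
    ((L.foldl bstep (m, b)).1.size ≤ m.size + L.length) ∧
    (1 ≤ (L.foldl bstep (m, b)).2 ∧
      ((L.foldl bstep (m, b)).2 = 1 ∨ ∃ k, (L.foldl bstep (m, b)).1.contains k = true ∧
          (L.foldl bstep (m, b)).2 = (L.foldl bstep (m, b)).1.getD k 0) ∧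
      (∀ k, (L.foldl bstep (m, b)).1.contains k = true →
          (L.foldl bstep (m, b)).1.getD k 0 ≤ (L.foldl bstep (m, b)).2)) := by
  intro L
  induction L with
  | nil =>
    intro m b _ _ _ hmem _ hrec hbnd hbest
    refine ⟨by simp, by simp, by simpa using hrec, by simpa using hbnd, by simp, by simpa using hbest⟩
  | cons x L ih =>
    intro m b hLsub hLdesc hnd hmem hlt hrec hbnd hbest
    have hxb : x ∈ bags := hLsub x (List.mem_cons_self ..)
    have hx0 : x ≠ 0 := fun h => hpre.1 (h ▸ hxb)
    have hx1 : x ≠ 1 := fun h => hpre.2 (h ▸ hxb)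
    have hxlt : x < x * x := lt_sq x hx0 hx1
    have hpc := (List.pairwise_cons.mp hLdesc)
    have hyLx : ∀ y ∈ L, y < x := hpc.1
    have hxL : x ∉ L := fun h => lt_irrefl x (hyLx x h)
    have hfresh : m.contains x = false :=
      Bool.eq_false_iff.mpr (fun hh => (((hmem x).mp hh).2) (List.mem_cons_self ..))
    have hsqiff : m.contains (x * x) = true ↔ x * x ∈ bags := by
      constructor
      · exact fun h => ((hmem _).mp h).1
      · intro h
        refine (hmem _).mpr ⟨h, ?_⟩
        intro hc
        rcases List.mem_cons.mp hc with hc | hc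
        · exact absurd hc.symm (ne_of_lt hxlt)
        · exact absurd (hyLx _ hc) (not_lt.mpr (le_of_lt hxlt))
    set v : Int := if x * x ∈ bags then 1 + m.getD (x * x) 0 else 1 with hvdef
    have hv : bstep (m, b) x = (m.insert x v, max b v) := by
      by_cases hsq : x * x ∈ bags
      · have h := hsqiff.mpr hsq
        simp [bstep, h, PySem.Dict.getD_insert_self, hvdef, hsq]
      · have h : m.contains (x * x) = false := Bool.eq_false_iff.mpr (fun hh => hsq (hsqiff.mp hh))
        simp [bstep, h, PySem.Dict.getD_insert_self, hvdef, hsq]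
    have hvpos : 1 ≤ v := by
      by_cases hsq : x * x ∈ bags
      · have := (hbnd _ (hsqiff.mpr hsq)).1; simp [hvdef, hsq]; omega
      · simp [hvdef, hsq]
    have hvbnd : v ≤ (m.size : Int) + 1 := by
      by_cases hsq : x * x ∈ bags
      · have := (hbnd _ (hsqiff.mpr hsq)).2; simp [hvdef, hsq]; omega
      · simp [hvdef, hsq]
    have hcont1 : ∀ k, (m.insert x v).contains k = true ↔ (k = x ∨ m.contains k = true) := by
      intro k; rw [PySem.Dict.contains_insert]; simp
    have hgold : ∀ k, k ≠ x → (m.insert x v).getD k 0 = m.getD k 0 :=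
      fun k hk => PySem.Dict.getD_insert_of_ne m v 0 hk
    have hgx : (m.insert x v).getD x 0 = v := PySem.Dict.getD_insert_self ..
    have hsize1 : (m.insert x v).size = m.size + 1 := by
      rw [PySem.Dict.size_insert]; simp [hfresh]
    have hkx : ∀ k, m.contains k = true → k ≠ x := by
      intro k hk he; rw [he, hfresh] at hk; exact Bool.false_ne_true hk
    have hxltk : ∀ k, m.contains k = true → x < k := fun k hk => hlt x (List.mem_cons_self ..) k hk
    have hmem1 : ∀ k, (m.insert x v).contains k = true ↔ (k ∈ bags ∧ k ∉ L) := by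
      intro k
      rw [hcont1]
      constructor
      · rintro (rfl | hk)
        · exact ⟨hxb, hxL⟩
        · have := (hmem k).mp hk
          exact ⟨this.1, fun h => this.2 (List.mem_cons_of_mem _ h)⟩
      · rintro ⟨hkb, hkL⟩
        by_cases he : k = x
        · exact Or.inl he
        · exact Or.inr ((hmem k).mpr ⟨hkb, by simp [List.mem_cons, he, hkL]⟩)
    have hlt1 : ∀ y ∈ L, ∀ k, (m.insert x v).contains k = true → y < k := by
      intro y hy k hk
      rcases (hcont1 k).mp hk with rfl | hk
      · exact hyLx y hy
      · exact hlt y (List.mem_cons_of_mem _ hy) k hk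
    have hrec1 : ∀ k, (m.insert x v).contains k = true →
        (m.insert x v).getD k 0 = if k * k ∈ bags then 1 + (m.insert x v).getD (k * k) 0 else 1 := by
      intro k hk
      rcases (hcont1 k).mp hk with rfl | hk
      · rw [hgx]
        by_cases hsq : k * k ∈ bags
        · rw [if_pos hsq, hgold _ (ne_of_gt hxlt)]
          simp [hvdef, hsq]
        · simp [hvdef, hsq]
      · have hkb := ((hmem k).mp hk).1
        rw [hgold k (hkx k hk), hrec k hk]
        by_cases hsq : k * k ∈ bags
        · have hk2 : k * k ≠ x := ne_of_gt (lt_trans (hxltk k hk)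
            (lt_sq k (fun h => hpre.1 (h ▸ hkb)) (fun h => hpre.2 (h ▸ hkb))))
          rw [if_pos hsq, if_pos hsq, hgold _ hk2]
        · rw [if_neg hsq, if_neg hsq]
    have hbnd1 : ∀ k, (m.insert x v).contains k = true →
        1 ≤ (m.insert x v).getD k 0 ∧ (m.insert x v).getD k 0 ≤ ((m.insert x v).size : Int) := by
      intro k hk
      rcases (hcont1 k).mp hk with rfl | hk
      · rw [hgx, hsize1]; push_cast; exact ⟨hvpos, hvbnd⟩
      · rw [hgold k (hkx k hk), hsize1]
        have := hbnd k hk; push_cast at this ⊢; omega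
    have hbest1 : 1 ≤ max b v ∧
        (max b v = 1 ∨ ∃ k, (m.insert x v).contains k = true ∧ max b v = (m.insert x v).getD k 0) ∧
        (∀ k, (m.insert x v).contains k = true → (m.insert x v).getD k 0 ≤ max b v) := by
      refine ⟨le_trans hbest.1 (le_max_left ..), ?_, ?_⟩
      · rcases max_choice b v with h | h
        · rw [h]
          rcases hbest.2.1 with h1 | ⟨k, hk, hbk⟩
          · exact Or.inl h1
          · exact Or.inr ⟨k, (hcont1 k).mpr (Or.inr hk), by rw [hgold k (hkx k hk)]; exact hbk⟩
        · exact Or.inr ⟨x, (hcont1 x).mpr (Or.inl rfl), by rw [h, hgx]⟩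
      · intro k hk
        rcases (hcont1 k).mp hk with rfl | hk
        · rw [hgx]; exact le_max_right ..
        · rw [hgold k (hkx k hk)]; exact le_trans (hbest.2.2 k hk) (le_max_left ..)
    obtain ⟨c1, c2, c3, c4, c5, c6⟩ := ih (m.insert x v) (max b v)
      (fun y hy => hLsub y (List.mem_cons_of_mem _ hy))
      hpc.2
      (PySem.Dict.nodup_keys_insert m x v hnd)
      hmem1 hlt1 hrec1 hbnd1 hbest1
    have hfold : (x :: L).foldl bstep (m, b) = L.foldl bstep (m.insert x v, max b v) := by
      rw [List.foldl_cons, hv]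
    refine ⟨?_, ?_, ?_, ?_, ?_, ?_⟩
    · rw [hfold]
      intro k
      rw [c1 k, hcont1 k]
      simp [List.mem_cons]
      tauto
    · rw [hfold]
      intro k hk
      rw [c2 k ((hcont1 k).mpr (Or.inr hk)), hgold k (hkx k hk)]
    · rw [hfold]; exact c3
    · rw [hfold]; exact c4
    · rw [hfold]
      have := c5
      rw [hsize1] at this
      simp only [List.length_cons]
      omega
    · rw [hfold]; exact c6

-- the inner while-loop of A counts exactly the memoized chain length of its start value,
-- and marks only set elements with smaller-or-equal chain length
lemma aInner_spec (bags : List Int) (bag : PySem.Dict Int Int) (M : PySem.Dict Int Int)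
    (hbag : ∀ k, bag.contains k = true ↔ k ∈ bags)
    (hrec : ∀ x ∈ bags, M.getD x 0 = if x * x ∈ bags then 1 + M.getD (x * x) 0 else 1)
    (hpos : ∀ x ∈ bags, 1 ≤ M.getD x 0) :
    ∀ (f : Nat) (taked : PySem.Dict Int Int) (cur count : Int),
    ((if cur ∈ bags then M.getD cur 0 + 1 else 1) ≤ (f : Int)) →
    (aInner bag f taked cur count).2 = count + (if cur ∈ bags then M.getD cur 0 else 0) ∧
    (∀ k, (aInner bag f taked cur count).1.contains k = true →
        taked.contains k = true ∨
          (k ∈ bags ∧ M.getD k 0 ≤ (if cur ∈ bags then M.getD cur 0 else 0))) := by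
  intro f
  induction f with
  | zero =>
    intro taked cur count hf
    exfalso
    by_cases hc : cur ∈ bags
    · have := hpos cur hc; simp [hc] at hf; omega
    · simp [hc] at hf
  | succ f ih =>
    intro taked cur count hf
    by_cases hc : cur ∈ bags
    · have hb : bag.contains cur = true := (hbag cur).mpr hc
      have hstep : aInner bag (f+1) taked cur count
          = aInner bag f (taked.insert cur cur) (cur*cur) (count+1) := by
        simp [aInner, hb]
      have hrc := hrec cur hc
      have hposc := hpos cur hc
      have hf' : (if cur*cur ∈ bags then M.getD (cur*cur) 0 + 1 else 1) ≤ (f : Int) := by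
        by_cases hc2 : cur*cur ∈ bags
        · simp [hc2] at hrc; simp [hc2]; simp [hc] at hf; omega
        · simp [hc] at hf; simp [hc2]; omega
      obtain ⟨h1, h2⟩ := ih (taked.insert cur cur) (cur*cur) (count+1) hf'
      rw [hstep]
      constructor
      · rw [h1]
        by_cases hc2 : cur*cur ∈ bags
        · simp [hc2] at hrc; simp [hc, hc2, hrc]; ring
        · simp [hc2] at hrc; simp [hc, hc2, hrc]
      · intro k hk
        rcases h2 k hk with h | ⟨hkb, hkle⟩
        · rw [PySem.Dict.contains_insert] at h
          rcases (by simpa using h : k = cur ∨ taked.contains k = true) with rfl | h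
          · right; exact ⟨hc, by simp [hc]⟩
          · left; exact h
        · right
          refine ⟨hkb, ?_⟩
          have hge : (if cur*cur ∈ bags then M.getD (cur*cur) 0 else 0) ≤ M.getD cur 0 := by
            by_cases hc2 : cur*cur ∈ bags <;> simp [hc2] at hrc ⊢ <;> omega
          simp [hc]
          omega
    · have hb : bag.contains cur = false := by
        rcases h : bag.contains cur with _ | _
        · rfl
        · exact absurd ((hbag cur).mp h) hc
      have hstep : aInner bag (f+1) taked cur count = (taked, count) := by
        simp [aInner, hb]
      rw [hstep]
      exact ⟨by simp [hc], fun k hk => Or.inl hk⟩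

-- invariant for A's outer fold: max_count is attained, bounds every processed chain length,
-- and only grows
lemma afold (bags : List Int) (bag : PySem.Dict Int Int) (M : PySem.Dict Int Int) (fuel : Nat)
    (hbag : ∀ k, bag.contains k = true ↔ k ∈ bags)
    (hrec : ∀ x ∈ bags, M.getD x 0 = if x * x ∈ bags then 1 + M.getD (x * x) 0 else 1)
    (hpos : ∀ x ∈ bags, 1 ≤ M.getD x 0)
    (hfuel : ∀ x ∈ bags, M.getD x 0 ≤ (fuel : Int)) :
    ∀ (L : List Int) (taked : PySem.Dict Int Int) (maxc : Int),
    (∀ y ∈ L, y ∈ bags) →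
    (∀ k, taked.contains k = true → k ∈ bags ∧ M.getD k 0 ≤ maxc) →
    (1 ≤ maxc ∧ (maxc = 1 ∨ ∃ x ∈ bags, maxc = M.getD x 0)) →
    (1 ≤ (L.foldl (astep bag fuel) (taked, maxc, 1)).2.1 ∧
      ((L.foldl (astep bag fuel) (taked, maxc, 1)).2.1 = 1 ∨
        ∃ x ∈ bags, (L.foldl (astep bag fuel) (taked, maxc, 1)).2.1 = M.getD x 0)) ∧
    (∀ x ∈ bags, x ∈ L → M.getD x 0 ≤ (L.foldl (astep bag fuel) (taked, maxc, 1)).2.1) ∧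
    (maxc ≤ (L.foldl (astep bag fuel) (taked, maxc, 1)).2.1) := by
  intro L
  induction L with
  | nil =>
    intro taked maxc _ _ hmx
    exact ⟨hmx, fun x _ hxL => absurd hxL (List.not_mem_nil), le_refl _⟩
  | cons r L ih =>
    intro taked maxc hLsub htk hmx
    have hrbag : r ∈ bags := hLsub r (List.mem_cons_self ..)
    by_cases htr : taked.contains r = true
    · have hs : astep bag fuel (taked, maxc, 1) r = (taked, maxc, 1) := by
        simp [astep, htr]
      obtain ⟨ca, cb, cc⟩ := ih taked maxc (fun y hy => hLsub y (List.mem_cons_of_mem _ hy)) htk hmx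
      rw [List.foldl_cons, hs]
      refine ⟨ca, ?_, cc⟩
      intro x hx hxL
      rcases List.mem_cons.mp hxL with rfl | hxL
      · exact le_trans (htk x htr).2 cc
      · exact cb x hx hxL
    · have htr' : taked.contains r = false := Bool.eq_false_iff.mpr htr
      have hrecr := hrec r hrbag
      have hfc : (if r * r ∈ bags then M.getD (r * r) 0 + 1 else 1) ≤ (fuel : Int) := by
        have hfr := hfuel r hrbag
        have hpr := hpos r hrbag
        by_cases hsq : r * r ∈ bags <;> simp [hsq] at hrecr ⊢ <;> omega
      obtain ⟨h1, h2⟩ := aInner_spec bags bag M hbag hrec hpos fuel taked (r * r) 1 hfc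
      have hcount : (aInner bag fuel taked (r * r) 1).2 = M.getD r 0 := by
        rw [h1]
        by_cases hsq : r * r ∈ bags <;> simp [hsq] at hrecr ⊢ <;> omega
      have hs : astep bag fuel (taked, maxc, 1) r
          = ((aInner bag fuel taked (r * r) 1).1, max maxc (aInner bag fuel taked (r * r) 1).2, 1) := by
        simp [astep, htr']
      have htk1 : ∀ k, (aInner bag fuel taked (r * r) 1).1.contains k = true →
          k ∈ bags ∧ M.getD k 0 ≤ max maxc (aInner bag fuel taked (r * r) 1).2 := by
        intro k hk
        rcases h2 k hk with hk | ⟨hkb, hkle⟩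
        · exact ⟨(htk k hk).1, le_trans (htk k hk).2 (le_max_left ..)⟩
        · refine ⟨hkb, ?_⟩
          rw [hcount]
          have : M.getD k 0 ≤ M.getD r 0 := by
            by_cases hsq : r * r ∈ bags <;> simp [hsq] at hrecr hkle <;> omega
          exact le_trans this (le_max_right ..)
      have hmx1 : 1 ≤ max maxc (aInner bag fuel taked (r * r) 1).2 ∧
          (max maxc (aInner bag fuel taked (r * r) 1).2 = 1 ∨
            ∃ x ∈ bags, max maxc (aInner bag fuel taked (r * r) 1).2 = M.getD x 0) := by
        refine ⟨le_trans hmx.1 (le_max_left ..), ?_⟩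
        rcases max_choice maxc (aInner bag fuel taked (r * r) 1).2 with h | h
        · rw [h]; exact hmx.2
        · rw [h, hcount]; exact Or.inr ⟨r, hrbag, rfl⟩
      obtain ⟨ca, cb, cc⟩ := ih (aInner bag fuel taked (r * r) 1).1
        (max maxc (aInner bag fuel taked (r * r) 1).2)
        (fun y hy => hLsub y (List.mem_cons_of_mem _ hy)) htk1 hmx1
      rw [List.foldl_cons, hs]
      refine ⟨ca, ?_, le_trans (le_max_left ..) cc⟩
      intro x hx hxL
      rcases List.mem_cons.mp hxL with rfl | hxL
      · exact le_trans (by rw [← hcount]; exact le_max_right ..) cc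
      · exact cb x hx hxL

-- ===== VERDICT (by name: the statement is the Claim_ definition above) =====
theorem max_set_size_spec : Claim_equal_max_set_size := by
  intro bags _ hpre
  unfold Spec_max_set_size
  obtain ⟨h0, h1⟩ := hpre
  -- B side: instantiate the fold invariant on the descending distinct list
  have hSnd : (PySem.Set.ofList bags).Nodup := PySem.Set.nodup_ofList bags
  set desc := PySem.List.sorted (PySem.Set.ofList bags) (fun x => x) true with hdesc
  have hdsub : ∀ y ∈ desc, y ∈ bags := fun y hy =>
    (PySem.Set.mem_ofList bags y).mp ((PySem.List.mem_sorted ..).mp hy)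
  have hdmem : ∀ y ∈ bags, y ∈ desc := fun y hy =>
    (PySem.List.mem_sorted ..).mpr ((PySem.Set.mem_ofList bags y).mpr hy)
  have hdnd : desc.Nodup :=
    ((PySem.List.sorted_perm (PySem.Set.ofList bags) (fun x => x) true).nodup_iff).mpr hSnd
  have hdle : desc.Pairwise (fun a b => b ≤ a) := PySem.List.sorted_pairwise_rev _ _
  have hddesc : desc.Pairwise (fun a b => b < a) :=
    (hdle.and hdnd).imp (fun h => lt_of_le_of_ne h.1 h.2.symm)
  obtain ⟨c1, c2, c3, c4, c5, c6⟩ := bfold bags ⟨h0, h1⟩ desc PySem.Dict.empty 1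
    hdsub hddesc PySem.Dict.nodup_keys_empty
    (by intro k; simp [PySem.Dict.contains_empty]; intro hkb; exact hdmem k hkb)
    (by intro y _ k hk; rw [PySem.Dict.contains_empty] at hk; exact absurd hk (by simp))
    (by intro k hk; rw [PySem.Dict.contains_empty] at hk; exact absurd hk (by simp))
    (by intro k hk; rw [PySem.Dict.contains_empty] at hk; exact absurd hk (by simp))
    ⟨le_refl 1, Or.inl rfl, by intro k hk; rw [PySem.Dict.contains_empty] at hk; exact absurd hk (by simp)⟩
  set M := (desc.foldl bstep (PySem.Dict.empty, 1)).1 with hM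
  set best := (desc.foldl bstep (PySem.Dict.empty, 1)).2 with hbest
  have hMmem : ∀ k, M.contains k = true ↔ k ∈ bags := by
    intro k
    rw [c1 k]
    simp [PySem.Dict.contains_empty]
    exact ⟨fun h => hdsub k h, fun h => hdmem k h⟩
  have hrecM : ∀ x ∈ bags, M.getD x 0 = if x * x ∈ bags then 1 + M.getD (x * x) 0 else 1 :=
    fun x hx => c3 x ((hMmem x).mpr hx)
  have hposM : ∀ x ∈ bags, 1 ≤ M.getD x 0 := fun x hx => (c4 x ((hMmem x).mpr hx)).1
  have hfuelM : ∀ x ∈ bags, M.getD x 0 ≤ (bags.length : Int) := by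
    intro x hx
    have hb := (c4 x ((hMmem x).mpr hx)).2
    have hsz := c5
    have hlen : desc.length = (PySem.Set.ofList bags).length := PySem.List.length_sorted ..
    have hle : (PySem.Set.ofList bags).length ≤ bags.length := PySem.Set.length_ofList_le bags
    rw [PySem.Dict.size_empty] at hsz
    have h2 : M.size ≤ bags.length := by omega
    omega
  -- A side
  set sortedBags := PySem.List.sorted bags (fun x => x) false with hsb
  set bag := sortedBags.foldl (fun d r => d.insert r r) PySem.Dict.empty with hbagd
  have hbag : ∀ k, bag.contains k = true ↔ k ∈ bags := by
    intro k
    rw [PySem.Dict.contains_iff_mem_keys]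
    have hk : bag.keys = PySem.Set.ofList sortedBags := by
      rw [hbagd]
      simpa using PySem.Dict.keys_foldl_insert (ν := Int) sortedBags (fun _ x => x) PySem.Dict.empty
    rw [hk, PySem.Set.mem_ofList, PySem.List.mem_sorted]
  obtain ⟨⟨ha1, ha2⟩, hbcov, _⟩ := afold bags bag M bags.length hbag hrecM hposM hfuelM
    sortedBags PySem.Dict.empty 1
    (fun y hy => (PySem.List.mem_sorted ..).mp hy)
    (by intro k hk; rw [PySem.Dict.contains_empty] at hk; exact absurd hk (by simp))
    ⟨le_refl 1, Or.inl rfl⟩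
  set maxcA := (sortedBags.foldl (astep bag bags.length) (PySem.Dict.empty, 1, 1)).2.1 with hmA
  have hble : best ≤ maxcA := by
    rcases c6.2.1 with h | ⟨k, hk, he⟩
    · rw [h]; exact ha1
    · rw [he]
      have hkb := (hMmem k).mp hk
      exact hbcov k hkb ((PySem.List.mem_sorted ..).mpr hkb)
  have hale : maxcA ≤ best := by
    rcases ha2 with h | ⟨x, hx, he⟩
    · rw [h]; exact c6.1
    · rw [he]; exact c6.2.2 x ((hMmem x).mpr hx)
  have heq : maxcA = best := le_antisymm hale hble
  have hA : max_set_size bags = if maxcA > 1 then maxcA else -1 := rfl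
  have hB : max_set_size_alt bags = if best > 1 then best else -1 := rfl
  rw [hA, hB, heq]
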